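-- pv_equiv track=rewrite | github.com/jchy20/how-much-backtrack | reasoning-gym/reasoning_gym/arc/arc_1d_tasks.py | transform_gravity_antigravity
-- ===== SOURCE A (Python) =====
-- def transform_gravity_antigravity(input_grid: list[int], direction: str = "right") -> list[int]:
--     size = len(input_grid)
--
--     # Extract colors
--     color1 = [x for x in input_grid if x == 1]  # Get all 1s
--     color2 = [x for x in input_grid if x == 2]  # Get all 2s
--
--     if direction == "right":
--         # color 2s on left, color 1s on right
--         return [2] * len(color2) + [0] * (size - len(color1) - len(color2)) + [1] * len(color1)
--     else:
--         # color 1s on left, color 2s on right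
--         return [1] * len(color1) + [0] * (size - len(color1) - len(color2)) + [2] * len(color2)
-- ===== SOURCE B (Python) =====
-- def transform_gravity_antigravity(input_grid: list[int], direction: str = "right") -> list[int]:
--     # Rank each cell (2s first, zeros middle, 1s last for "right"; mirrored otherwise),
--     # sort the ranks, and map ranks back to colors.
--     if direction == "right":
--         ranks = sorted(2 if v == 1 else 0 if v == 2 else 1 for v in input_grid)
--         return [2 if r == 0 else 1 if r == 2 else 0 for r in ranks]
--     else:
--         ranks = sorted(2 if v == 2 else 0 if v == 1 else 1 for v in input_grid)
--         return [1 if r == 0 else 2 if r == 2 else 0 for r in ranks]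
-- ===== Notes on version B (the rewrite author's own statement) =====
-- stated objective: alternative
-- what changed: B replaces A's count-and-rebuild (two filters plus three replicated blocks) with a normalize-to-rank, sort, map-back pipeline.
import Mathlib
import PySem

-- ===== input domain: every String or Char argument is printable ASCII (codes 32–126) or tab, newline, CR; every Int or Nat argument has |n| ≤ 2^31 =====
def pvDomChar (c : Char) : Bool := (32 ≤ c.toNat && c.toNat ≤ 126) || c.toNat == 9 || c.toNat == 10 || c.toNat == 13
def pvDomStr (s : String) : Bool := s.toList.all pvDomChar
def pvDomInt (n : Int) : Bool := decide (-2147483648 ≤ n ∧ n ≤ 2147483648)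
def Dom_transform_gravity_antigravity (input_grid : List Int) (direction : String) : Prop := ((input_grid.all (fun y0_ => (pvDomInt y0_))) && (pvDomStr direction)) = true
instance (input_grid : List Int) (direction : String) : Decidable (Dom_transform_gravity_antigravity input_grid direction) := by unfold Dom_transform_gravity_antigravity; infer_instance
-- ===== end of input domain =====

-- B re-implements A's count-and-rebuild as a rank / sort / map-back pipeline (objective: alternative).

-- ===== PORT A =====
def transform_gravity_antigravity (input_grid : List Int) (direction : String) : List Int :=
  let size := input_grid.length
  let color1 := input_grid.filter (fun x => x == 1)
  let color2 := input_grid.filter (fun x => x == 2)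
  if direction == "right" then
    List.replicate color2.length 2 ++ List.replicate (size - color1.length - color2.length) 0 ++ List.replicate color1.length 1
  else
    List.replicate color1.length 1 ++ List.replicate (size - color1.length - color2.length) 0 ++ List.replicate color2.length 2

-- ===== PORT B =====
def transform_gravity_antigravity_alt (input_grid : List Int) (direction : String) : List Int :=
  if direction == "right" then
    let ranks := PySem.List.sorted (input_grid.map (fun v => if v == 1 then (2 : Int) else if v == 2 then 0 else 1)) (fun x => x) false
    ranks.map (fun r => if r == 0 then (2 : Int) else if r == 2 then 1 else 0)
  else
    let ranks := PySem.List.sorted (input_grid.map (fun v => if v == 2 then (2 : Int) else if v == 1 then 0 else 1)) (fun x => x) false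
    ranks.map (fun r => if r == 0 then (1 : Int) else if r == 2 then 2 else 0)

-- ===== PRECONDITION & SPEC =====
def Spec_transform_gravity_antigravity (input_grid : List Int) (direction : String) (out : List Int) : Prop := out = transform_gravity_antigravity_alt input_grid direction
instance (input_grid : List Int) (direction : String) (out : List Int) : Decidable (Spec_transform_gravity_antigravity input_grid direction out) := by unfold Spec_transform_gravity_antigravity; infer_instance

-- ===== CLAIM (what is proved, stated in full; the proofs are below) =====
def Claim_equal_transform_gravity_antigravity : Prop := ∀ (input_grid : List Int) (direction : String), Dom_transform_gravity_antigravity input_grid direction → Spec_transform_gravity_antigravity input_grid direction (transform_gravity_antigravity input_grid direction)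

-- ===== LEMMAS AND PROOFS =====

-- The sorted-block list is a permutation of the rank image.
theorem pv_perm_blocks (k : Int → Int) (hk : ∀ v, k v = 0 ∨ k v = 1 ∨ k v = 2) (xs : List Int) :
    (List.replicate (xs.countP (fun v => k v == 0)) (0 : Int) ++
     (List.replicate (xs.countP (fun v => k v == 1)) 1 ++
      List.replicate (xs.countP (fun v => k v == 2)) 2)).Perm (xs.map k) := by
  induction xs with
  | nil => simp
  | cons x xs ih =>
    rcases hk x with h | h | h
    · simp only [List.countP_cons, List.map_cons, h]
      norm_num [List.replicate_succ]
      exact ih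
    · simp only [List.countP_cons, List.map_cons, h]
      norm_num [List.replicate_succ]
      exact List.perm_middle.trans (List.Perm.cons 1 ih)
    · simp only [List.countP_cons, List.map_cons, h]
      norm_num [List.replicate_succ]
      rw [show List.replicate (xs.countP fun v => k v == 0) (0:Int) ++
            (List.replicate (xs.countP fun v => k v == 1) 1 ++
             (2 :: List.replicate (xs.countP fun v => k v == 2) 2)) =
          (List.replicate (xs.countP fun v => k v == 0) (0:Int) ++
            List.replicate (xs.countP fun v => k v == 1) 1) ++
             (2 :: List.replicate (xs.countP fun v => k v == 2) 2) by
        simp [List.append_assoc]]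
      refine List.perm_middle.trans (List.Perm.cons 2 ?_)
      rw [List.append_assoc]
      exact ih

-- The block list is pairwise non-decreasing.
theorem pv_pairwise_blocks (n0 n1 n2 : Nat) :
    (List.replicate n0 (0 : Int) ++ (List.replicate n1 1 ++ List.replicate n2 2)).Pairwise (· ≤ ·) := by
  simp only [List.pairwise_append, List.mem_append, List.mem_replicate, List.pairwise_replicate]
  refine ⟨?_, ⟨?_, ?_, ?_⟩, ?_⟩
  · omega
  · omega
  · omega
  · intro a ha b hb
    obtain ⟨_, ha⟩ := ha
    obtain ⟨_, hb⟩ := hb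
    omega
  · intro a ha b hb
    obtain ⟨_, ha⟩ := ha
    rcases hb with ⟨_, hb⟩ | ⟨_, hb⟩ <;> omega

-- Sorting the ranks yields exactly the block list.
theorem pv_sorted_blocks (k : Int → Int) (hk : ∀ v, k v = 0 ∨ k v = 1 ∨ k v = 2) (xs : List Int) :
    PySem.List.sorted (xs.map k) (fun x => x) false =
      List.replicate (xs.countP (fun v => k v == 0)) (0 : Int) ++
      (List.replicate (xs.countP (fun v => k v == 1)) 1 ++
       List.replicate (xs.countP (fun v => k v == 2)) 2) :=
  PySem.List.sorted_id_eq_of_perm_of_pairwise _ _ (pv_perm_blocks k hk xs) (pv_pairwise_blocks _ _ _)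

-- Three mutually exclusive, jointly exhaustive predicates partition the length.
theorem pv_count_split (xs : List Int) (p q r : Int → Bool)
    (h : ∀ v, (p v = true → q v = false ∧ r v = false) ∧ (q v = true → r v = false) ∧ (p v = true ∨ q v = true ∨ r v = true)) :
    xs.countP p + xs.countP q + xs.countP r = xs.length := by
  induction xs with
  | nil => simp
  | cons x xs ih =>
    obtain ⟨h1, h2, h3⟩ := h x
    simp only [List.countP_cons, List.length_cons]
    by_cases hp : p x = true
    · obtain ⟨hq, hr⟩ := h1 hp
      simp [hp, hq, hr]
      omega
    · by_cases hq : q x = true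
      · have hr := h2 hq
        simp [hp, hq, hr]
        omega
      · have hr : r x = true := by
          rcases h3 with a | a | a
          · exact absurd a hp
          · exact absurd a hq
          · exact a
        simp [hp, hq, hr]
        omega

-- ===== VERDICT (by name: the statement is the Claim_ definition above) =====
theorem transform_gravity_antigravity_spec : Claim_equal_transform_gravity_antigravity := by
  intro xs direction _
  unfold Spec_transform_gravity_antigravity transform_gravity_antigravity transform_gravity_antigravity_alt
  by_cases hd : direction == "right" <;> simp only [hd, if_true]
  case pos =>
    rw [pv_sorted_blocks (fun v => if v == 1 then (2 : Int) else if v == 2 then 0 else 1)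
        (by intro v; by_cases h1 : v = 1 <;> by_cases h2 : v = 2 <;> simp [h1, h2])]
    have hc0 : xs.countP (fun v => (if v == 1 then (2 : Int) else if v == 2 then 0 else 1) == 0)
        = (xs.filter (fun x => x == 2)).length := by
      rw [← List.countP_eq_length_filter]
      apply List.countP_congr
      intro v _
      by_cases h1 : v = 1 <;> by_cases h2 : v = 2 <;> simp [h1, h2]
    have hc2 : xs.countP (fun v => (if v == 1 then (2 : Int) else if v == 2 then 0 else 1) == 2)
        = (xs.filter (fun x => x == 1)).length := by
      rw [← List.countP_eq_length_filter]
      apply List.countP_congr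
      intro v _
      by_cases h1 : v = 1 <;> by_cases h2 : v = 2 <;> simp [h1, h2]
    have hsplit := pv_count_split xs
      (fun v => (if v == 1 then (2 : Int) else if v == 2 then 0 else 1) == 0)
      (fun v => (if v == 1 then (2 : Int) else if v == 2 then 0 else 1) == 1)
      (fun v => (if v == 1 then (2 : Int) else if v == 2 then 0 else 1) == 2)
      (by intro v; by_cases h1 : v = 1 <;> by_cases h2 : v = 2 <;> simp [h1, h2])
    have hmid : xs.countP (fun v => (if v == 1 then (2 : Int) else if v == 2 then 0 else 1) == 1)
        = xs.length - (xs.filter (fun x => x == 1)).length - (xs.filter (fun x => x == 2)).length := by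
      omega
    simp only [List.map_append, List.map_replicate, List.append_assoc]
    rw [hc0, hc2, hmid]
    norm_num
  case neg =>
    rw [pv_sorted_blocks (fun v => if v == 2 then (2 : Int) else if v == 1 then 0 else 1)
        (by intro v; by_cases h1 : v = 1 <;> by_cases h2 : v = 2 <;> simp [h1, h2])]
    have hc0 : xs.countP (fun v => (if v == 2 then (2 : Int) else if v == 1 then 0 else 1) == 0)
        = (xs.filter (fun x => x == 1)).length := by
      rw [← List.countP_eq_length_filter]
      apply List.countP_congr
      intro v _
      by_cases h1 : v = 1 <;> by_cases h2 : v = 2 <;> simp [h1, h2]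
    have hc2 : xs.countP (fun v => (if v == 2 then (2 : Int) else if v == 1 then 0 else 1) == 2)
        = (xs.filter (fun x => x == 2)).length := by
      rw [← List.countP_eq_length_filter]
      apply List.countP_congr
      intro v _
      by_cases h1 : v = 1 <;> by_cases h2 : v = 2 <;> simp [h1, h2]
    have hsplit := pv_count_split xs
      (fun v => (if v == 2 then (2 : Int) else if v == 1 then 0 else 1) == 0)
      (fun v => (if v == 2 then (2 : Int) else if v == 1 then 0 else 1) == 1)
      (fun v => (if v == 2 then (2 : Int) else if v == 1 then 0 else 1) == 2)
      (by intro v; by_cases h1 : v = 1 <;> by_cases h2 : v = 2 <;> simp [h1, h2])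
    have hmid : xs.countP (fun v => (if v == 2 then (2 : Int) else if v == 1 then 0 else 1) == 1)
        = xs.length - (xs.filter (fun x => x == 1)).length - (xs.filter (fun x => x == 2)).length := by
      omega
    simp only [List.map_append, List.map_replicate, List.append_assoc]
    rw [hc0, hc2, hmid]
    norm_num
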